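-- pv_equiv track=rewrite | github.com/SardorchikDev/Lumi | src/chat/model_filters.py | _resolve_allowlist_entry
-- ===== SOURCE A (Python) =====
-- def _resolve_allowlist_entry(entry: str, models: list[str]) -> str | None:
--     lowered = entry.lower()
--     for model in models:
--         if model.lower() == lowered:
--             return model
--     suffix_matches = [model for model in models if model.split("/")[-1].lower() == lowered]
--     if len(suffix_matches) == 1:
--         return suffix_matches[0]
--     contains_matches = [model for model in models if lowered in model.lower()]
--     if len(contains_matches) == 1:
--         return contains_matches[0]
--     return None
-- ===== SOURCE B (Python) =====
-- def _resolve_allowlist_entry(entry: str, models: list[str]) -> str | None: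
--     lowered = entry.lower()
--     exact, suffix, contains = [], [], []
--     for model in models:
--         ml = model.lower()
--         if ml == lowered:
--             exact.append(model)
--         if model.split("/")[-1].lower() == lowered:
--             suffix.append(model)
--         if lowered in ml:
--             contains.append(model)
--     if exact:
--         return exact[0]
--     if len(suffix) == 1:
--         return suffix[0]
--     if len(contains) == 1:
--         return contains[0]
--     return None
-- ===== Notes on version B (the rewrite author's own statement) =====
-- stated objective: alternative
-- what changed: Replaces A's early-return scan plus two later full filtering passes (up to three traversals of models) with a single pass that classifies every model into exact/suffix/contains buckets, followed by a post-loop decision ladder.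
import Mathlib
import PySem

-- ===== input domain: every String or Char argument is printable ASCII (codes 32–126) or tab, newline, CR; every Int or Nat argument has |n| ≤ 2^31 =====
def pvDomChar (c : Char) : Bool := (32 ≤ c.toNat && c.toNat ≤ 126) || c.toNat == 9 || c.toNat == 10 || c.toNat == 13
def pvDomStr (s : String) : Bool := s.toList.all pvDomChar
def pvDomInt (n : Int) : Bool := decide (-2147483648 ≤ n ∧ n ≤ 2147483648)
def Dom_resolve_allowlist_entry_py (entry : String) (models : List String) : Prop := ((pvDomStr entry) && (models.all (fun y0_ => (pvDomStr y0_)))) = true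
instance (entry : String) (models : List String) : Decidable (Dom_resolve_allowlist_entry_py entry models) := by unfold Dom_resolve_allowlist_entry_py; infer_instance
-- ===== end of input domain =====

-- B replaces A's early-return scan plus two later filtering passes with one classifying
-- pass that buckets every model (exact/suffix/contains) and a post-loop decision ladder.

-- shared literal translation of Python's `model.split("/")[-1].lower() == lowered`
-- (appears verbatim in both A and B)
def pvSuffixMatch (lowered model : String) : Bool :=
  match PySem.Str.split? model "/" with
  | some parts =>
    match PySem.List.pyGet? parts (-1) with
    | some last => PySem.Str.lower last == lowered
    | none => false
  | none => false

-- ===== PORT A =====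
def resolve_allowlist_entry_py (entry : String) (models : List String) : Option String :=
  let lowered := PySem.Str.lower entry
  match models.find? (fun model => PySem.Str.lower model == lowered) with
  | some m => some m
  | none =>
    let suffix_matches := models.filter (fun model => pvSuffixMatch lowered model)
    if suffix_matches.length == 1 then suffix_matches.head?
    else
      let contains_matches := models.filter (fun model => PySem.Str.isIn lowered (PySem.Str.lower model))
      if contains_matches.length == 1 then contains_matches.head?
      else none

-- ===== PORT B =====
-- loop body of B's single classifying pass
def pvClassifyStep (lowered : String) (st : List String × List String × List String)
    (model : String) : List String × List String × List String :=
  let ml := PySem.Str.lower model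
  let st1 := if ml == lowered then (st.1 ++ [model], st.2.1, st.2.2) else st
  let st2 := if pvSuffixMatch lowered model then (st1.1, st1.2.1 ++ [model], st1.2.2) else st1
  if PySem.Str.isIn lowered ml then (st2.1, st2.2.1, st2.2.2 ++ [model]) else st2

def resolve_allowlist_entry_py_alt (entry : String) (models : List String) : Option String :=
  let lowered := PySem.Str.lower entry
  let acc := models.foldl (pvClassifyStep lowered) ([], [], [])
  match acc.1 with
  | m :: _ => some m
  | [] =>
    if acc.2.1.length == 1 then acc.2.1.head?
    else if acc.2.2.length == 1 then acc.2.2.head?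
    else none

-- ===== PRECONDITION & SPEC =====
def Spec_resolve_allowlist_entry_py (entry : String) (models : List String) (out : Option String) : Prop := out = resolve_allowlist_entry_py_alt entry models
instance (entry : String) (models : List String) (out : Option String) : Decidable (Spec_resolve_allowlist_entry_py entry models out) := by unfold Spec_resolve_allowlist_entry_py; infer_instance

-- ===== CLAIM (what is proved, stated in full; the proofs are below) =====
def Claim_equal_resolve_allowlist_entry_py : Prop := ∀ (entry : String) (models : List String), Dom_resolve_allowlist_entry_py entry models → Spec_resolve_allowlist_entry_py entry models (resolve_allowlist_entry_py entry models)

-- ===== LEMMAS AND PROOFS =====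

-- find? returns the head of the filter
theorem pv_find?_eq_head?_filter {α : Type} (p : α → Bool) (l : List α) :
    l.find? p = (l.filter p).head? := by
  induction l with
  | nil => rfl
  | cons x t ih =>
    cases h : p x
    · rw [List.find?_cons_of_neg (by simp [h]), List.filter_cons_of_neg (by simp [h]), ih]
    · rw [List.find?_cons_of_pos h, List.filter_cons_of_pos h, List.head?_cons]

-- B's classifying fold computes the three filters, appended to the running buckets
theorem pv_fold_classify (lowered : String) (l e s c : List String) :
    l.foldl (pvClassifyStep lowered) (e, s, c)
    = (e ++ l.filter (fun m => PySem.Str.lower m == lowered),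
       s ++ l.filter (fun m => pvSuffixMatch lowered m),
       c ++ l.filter (fun m => PySem.Str.isIn lowered (PySem.Str.lower m))) := by
  induction l generalizing e s c with
  | nil => simp
  | cons x t ih =>
    simp only [List.foldl_cons, List.filter_cons]
    by_cases h1 : (PySem.Str.lower x == lowered) = true <;>
      by_cases h2 : pvSuffixMatch lowered x = true <;>
      by_cases h3 : PySem.Chars.isIn lowered.toList (PySem.Chars.lower x.toList) = true <;>
      simp [pvClassifyStep, h1, h2, h3, ih]

-- ===== VERDICT (by name: the statement is the Claim_ definition above) =====
theorem resolve_allowlist_entry_py_spec : Claim_equal_resolve_allowlist_entry_py := by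
  intro entry models _
  unfold Spec_resolve_allowlist_entry_py resolve_allowlist_entry_py resolve_allowlist_entry_py_alt
  dsimp only
  rw [pv_fold_classify, pv_find?_eq_head?_filter]
  simp only [List.nil_append]
  cases models.filter (fun m => PySem.Str.lower m == PySem.Str.lower entry) with
  | nil => rfl
  | cons m rest => rfl
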